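-- pv_equiv track=rewrite | github.com/changediyasunny/Challenges | leetcode_2018/259_3sum_smaller.py | sum_smaller
-- ===== SOURCE A (Python) =====
-- def sum_smaller(nums, target):
--     # we sort because we only need count of index triplets and not
--     # the actual indexes window
--     nums.sort()
--     count = 0
--     for k in range(len(nums)):
--         i = 0
--         j = k -1
--         while i < j:
--             if nums[i] + nums[j] + nums[k] < target:
--                 count += j - i
--                 i += 1
--             else:
--                 j -= 1
--     return count
-- ===== SOURCE B (Python) =====
-- def sum_smaller(nums, target):
--     # Sort in place (same observable mutation as the original), then for each
--     # pair i<j binary-search the sorted suffix k>j for how many nums[k] keep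
--     # the triple sum below target; once a pair contributes nothing, no later
--     # pair with the same i can (the remainder only shrinks), so break.
--     nums.sort()
--     n = len(nums)
--     total = 0
--     for i in range(n):
--         for j in range(i + 1, n):
--             rem = target - nums[i] - nums[j]
--             lo, hi = j + 1, n
--             while lo < hi:
--                 mid = (lo + hi) // 2
--                 if nums[mid] < rem:
--                     lo = mid + 1
--                 else:
--                     hi = mid
--             c = lo - (j + 1)
--             if c == 0:
--                 break
--             total += c
--     return total
-- ===== Notes on version B (the rewrite author's own statement) =====
-- stated objective: alternative
-- what changed: Replaces the inward two-pointer sweep per largest index with a sort-then-binary-search pass: for each pair i<j a hand-written bisect_left over the sorted suffix k>j counts the elements keeping the sum below target, breaking out of the j-loop once a pair contributes nothing.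
import Mathlib
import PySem

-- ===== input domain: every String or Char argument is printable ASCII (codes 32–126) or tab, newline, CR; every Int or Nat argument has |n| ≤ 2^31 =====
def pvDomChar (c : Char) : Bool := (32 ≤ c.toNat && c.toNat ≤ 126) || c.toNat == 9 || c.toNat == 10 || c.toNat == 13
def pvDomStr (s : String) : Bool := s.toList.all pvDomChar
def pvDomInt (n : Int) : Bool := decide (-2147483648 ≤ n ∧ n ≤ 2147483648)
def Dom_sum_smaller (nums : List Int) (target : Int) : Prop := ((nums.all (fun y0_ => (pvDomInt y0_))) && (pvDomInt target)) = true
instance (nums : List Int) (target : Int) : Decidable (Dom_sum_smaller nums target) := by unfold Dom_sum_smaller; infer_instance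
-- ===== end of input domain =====

-- B replaces A's inward two-pointer sweep per largest index with a pair loop plus a
-- hand-written binary search over the sorted suffix (alternative algorithm, similar cost).
-- Both Pythons sort `nums` in place; the equivalence proved here is about the RETURN value.

-- ===== PORT A =====
-- Inner while-loop of A: pointers i, j are always ≥ 0, so Nat indices are exact;
-- `count += j - i` is Int addition of the pointer difference (positive, since i < j).
def tpA (s : List Int) (target sk : Int) (i j : Nat) (count : Int) : Int :=
  if i < j then
    if s.getD i 0 + s.getD j 0 + sk < target then
      tpA s target sk (i + 1) j (count + ((j : Int) - (i : Int)))
    else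
      tpA s target sk i (j - 1) count
  else count
termination_by j - i
decreasing_by all_goals omega

def sum_smaller (nums : List Int) (target : Int) : Int :=
  let s := PySem.List.sorted nums (fun x => x) false
  (List.range s.length).foldl (fun count k => tpA s target (s.getD k 0) 0 (k - 1) count) 0

-- ===== PORT B =====
-- Hand-written bisect_left loop of B; lo, hi are nonnegative indices, and
-- (lo + hi) // 2 on nonnegative ints is exactly Nat division.
def bsearch (s : List Int) (rem : Int) (lo hi : Nat) : Nat :=
  if lo < hi then
    let mid := (lo + hi) / 2
    if s.getD mid 0 < rem then bsearch s rem (mid + 1) hi else bsearch s rem lo mid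
  else lo
termination_by hi - lo
decreasing_by all_goals omega

-- B's inner j-loop: compute c = lo - (j+1); `break` on c == 0 is the early return.
def loopB (s : List Int) (target : Int) (n i : Nat) : List Nat → Int → Int
  | [], total => total
  | j :: rest, total =>
    let c : Nat := bsearch s (target - s.getD i 0 - s.getD j 0) (j + 1) n - (j + 1)
    if c = 0 then total else loopB s target n i rest (total + (c : Int))

def sum_smaller_alt (nums : List Int) (target : Int) : Int :=
  let s := PySem.List.sorted nums (fun x => x) false
  let n := s.length
  (List.range n).foldl (fun total i =>
    loopB s target n i (List.range' (i + 1) (n - (i + 1))) total) 0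

-- ===== PRECONDITION & SPEC =====
def Spec_sum_smaller (nums : List Int) (target : Int) (out : Int) : Prop := out = sum_smaller_alt nums target
instance (nums : List Int) (target : Int) (out : Int) : Decidable (Spec_sum_smaller nums target out) := by unfold Spec_sum_smaller; infer_instance

-- ===== CLAIM (what is proved, stated in full; the proofs are below) =====
def Claim_equal_sum_smaller : Prop := ∀ (nums : List Int) (target : Int), Dom_sum_smaller nums target → Spec_sum_smaller nums target (sum_smaller nums target)

-- ===== LEMMAS AND PROOFS =====

theorem sorted_getD_mono (s : List Int) (hs : s.Pairwise (· ≤ ·)) {a b : Nat}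
    (hab : a ≤ b) (hb : b < s.length) : s.getD a 0 ≤ s.getD b 0 := by
  rcases Nat.lt_or_ge a b with h | h
  · have ha : a < s.length := lt_trans h hb
    rw [List.getD_eq_getElem s 0 ha, List.getD_eq_getElem s 0 hb]
    exact List.pairwise_iff_getElem.mp hs a b ha hb h
  · have : a = b := le_antisymm hab h
    subst this; rfl

-- number of indices k ∈ [lo, hi) with s[k] < r, as an Int-valued 0/1 sum
def cntk (s : List Int) (r : Int) (lo hi : Nat) : Int :=
  ∑ k ∈ Finset.Ico lo hi, (if s.getD k 0 < r then (1 : Int) else 0)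

theorem bsearch_spec (s : List Int) (r : Int) (hs : s.Pairwise (· ≤ ·)) :
    ∀ lo hi, hi ≤ s.length → (bsearch s r lo hi : Int) = lo + cntk s r lo hi := by
  intro lo hi
  induction lo, hi using bsearch.induct s r with
  | case1 lo hi hlt mid hmidlt ih =>
    intro hn
    rw [bsearch, if_pos hlt, if_pos hmidlt]
    have h1 : lo ≤ mid + 1 := by omega
    have h2 : mid + 1 ≤ hi := by omega
    have hsplit : cntk s r lo (mid + 1) + cntk s r (mid + 1) hi = cntk s r lo hi :=
      Finset.sum_Ico_consecutive _ h1 h2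
    have hall : cntk s r lo (mid + 1) = (mid + 1 - lo : Nat) := by
      unfold cntk
      have hone : ∀ k ∈ Finset.Ico lo (mid + 1), (if s.getD k 0 < r then (1 : Int) else 0) = 1 := by
        intro k hk
        have hk' := Finset.mem_Ico.mp hk
        have : s.getD k 0 ≤ s.getD mid 0 := sorted_getD_mono s hs (by omega) (by omega)
        rw [if_pos (by omega)]
      rw [Finset.sum_congr rfl hone, Finset.sum_const, Nat.card_Ico]
      simp
    rw [ih hn]
    rw [← hsplit, hall]
    push_cast
    omega
  | case2 lo hi hlt mid hmidge ih =>
    intro hn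
    rw [bsearch, if_pos hlt, if_neg hmidge]
    have h1 : lo ≤ mid := by omega
    have h2 : mid ≤ hi := by omega
    have hsplit : cntk s r lo mid + cntk s r mid hi = cntk s r lo hi :=
      Finset.sum_Ico_consecutive _ h1 h2
    have hzero : cntk s r mid hi = 0 := by
      unfold cntk
      apply Finset.sum_eq_zero
      intro k hk
      have hk' := Finset.mem_Ico.mp hk
      rw [if_neg]
      have : s.getD mid 0 ≤ s.getD k 0 := sorted_getD_mono s hs (by omega) (by omega)
      omega
    rw [ih (by omega)]
    omega
  | case3 lo hi hge =>
    intro hn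
    rw [bsearch, if_neg hge]
    have : cntk s r lo hi = 0 := by
      unfold cntk
      rw [Finset.Ico_eq_empty (by omega), Finset.sum_empty]
    omega

-- A's inner count for fixed largest index (value s[k] = sk): pairs a < b ≤ j with a ≥ i
def pcA (s : List Int) (target sk : Int) (i j : Nat) : Int :=
  ∑ a ∈ Finset.Ico i (j + 1), ∑ b ∈ Finset.Ico (a + 1) (j + 1),
    (if s.getD a 0 + s.getD b 0 + sk < target then (1 : Int) else 0)

theorem tpA_spec (s : List Int) (target sk : Int) (hs : s.Pairwise (· ≤ ·)) :
    ∀ i j (c : Int), j < s.length → tpA s target sk i j c = c + pcA s target sk i j := by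
  intro i j c
  induction i, j, c using tpA.induct s target sk with
  | case1 i j c hij hcond ih =>
    intro hj
    rw [tpA, if_pos hij, if_pos hcond, ih hj]
    have hrow : ∑ b ∈ Finset.Ico (i + 1) (j + 1),
        (if s.getD i 0 + s.getD b 0 + sk < target then (1 : Int) else 0) = ((j : Int) - (i : Int)) := by
      have hone : ∀ b ∈ Finset.Ico (i + 1) (j + 1),
          (if s.getD i 0 + s.getD b 0 + sk < target then (1 : Int) else 0) = 1 := by
        intro b hb
        have hb' := Finset.mem_Ico.mp hb
        have : s.getD b 0 ≤ s.getD j 0 := sorted_getD_mono s hs (by omega) hj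
        rw [if_pos (by omega)]
      rw [Finset.sum_congr rfl hone, Finset.sum_const, Nat.card_Ico]
      simp only [nsmul_eq_mul, mul_one]
      omega
    have hsplit : pcA s target sk i j
        = ((j : Int) - (i : Int)) + pcA s target sk (i + 1) j := by
      unfold pcA
      rw [Finset.sum_eq_sum_Ico_succ_bot (by omega : i < j + 1), hrow]
    rw [hsplit]; ring
  | case2 i j c hij hcond ih =>
    intro hj
    have hj1 : j - 1 + 1 = j := by omega
    rw [tpA, if_pos hij, if_neg hcond, ih (by omega)]
    have hsplit : pcA s target sk i j = pcA s target sk i (j - 1) := by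
      unfold pcA
      rw [hj1]
      rw [Finset.sum_Ico_succ_top (by omega : i ≤ j), Finset.Ico_self, Finset.sum_empty, add_zero]
      apply Finset.sum_congr rfl
      intro a ha
      have ha' := Finset.mem_Ico.mp ha
      rw [Finset.sum_Ico_succ_top (by omega : a + 1 ≤ j)]
      have hzero : (if s.getD a 0 + s.getD j 0 + sk < target then (1 : Int) else 0) = 0 := by
        have : s.getD i 0 ≤ s.getD a 0 := sorted_getD_mono s hs (by omega) (by omega)
        rw [if_neg (by omega)]
      rw [hzero, add_zero]
    rw [hsplit]
  | case3 i j c hij =>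
    intro hj
    rw [tpA, if_neg hij]
    have : pcA s target sk i j = 0 := by
      unfold pcA
      apply Finset.sum_eq_zero
      intro a ha
      have ha' := Finset.mem_Ico.mp ha
      rw [Finset.Ico_eq_empty (by omega), Finset.sum_empty]
    rw [this, add_zero]

theorem foldl_acc (h : Int → Nat → Int) (G : Nat → Int) :
    ∀ (l : List Nat) (c : Int), (∀ (c : Int), ∀ x ∈ l, h c x = c + G x) →
      l.foldl h c = c + (l.map G).sum := by
  intro l
  induction l with
  | nil => intro c _; simp
  | cons x t ih =>
    intro c hh
    simp only [List.foldl_cons, List.map_cons, List.sum_cons]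
    rw [hh c x (List.mem_cons_self), ih _ (fun c y hy => hh c y (List.mem_cons_of_mem _ hy))]
    ring

theorem sum_map_range (f : Nat → Int) : ∀ n, ((List.range n).map f).sum = ∑ k ∈ Finset.range n, f k := by
  intro n
  induction n with
  | zero => simp
  | succ m ih =>
    rw [List.range_succ, List.map_append, List.sum_append, Finset.sum_range_succ, ih]
    simp

theorem sum_map_range' (f : Nat → Int) :
    ∀ (len a : Nat), ((List.range' a len).map f).sum = ∑ j ∈ Finset.Ico a (a + len), f j := by
  intro len
  induction len with
  | zero => simp
  | succ m ih =>
    intro a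
    rw [List.range'_succ]
    simp only [List.map_cons, List.sum_cons, ih (a + 1)]
    rw [Finset.sum_eq_sum_Ico_succ_bot (by omega : a < a + (m + 1)),
      show a + 1 + m = a + (m + 1) from by omega]

theorem ite_sum (P : Prop) [Decidable P] (S : Finset Nat) (h : Nat → Int) :
    (if P then ∑ j ∈ S, h j else 0) = ∑ j ∈ S, (if P then h j else 0) := by
  split_ifs <;> simp

theorem sum_Ico_guard (f : Nat → Int) (l u n : Nat) (hu : u ≤ n) :
    ∑ x ∈ Finset.Ico l u, f x = ∑ x ∈ Finset.range n, if l ≤ x ∧ x < u then f x else 0 := by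
  have h : Finset.Ico l u = (Finset.range n).filter (fun x => l ≤ x ∧ x < u) := by
    ext x
    simp only [Finset.mem_Ico, Finset.mem_range, Finset.mem_filter]
    omega
  rw [h, Finset.sum_filter]

-- both nested triangle sums enumerate the triples i < j < k < n
theorem fubini (n : Nat) (χ : Nat → Nat → Nat → Int) :
    ∑ k ∈ Finset.range n, ∑ i ∈ Finset.Ico 0 k, ∑ j ∈ Finset.Ico (i + 1) k, χ i j k
    = ∑ i ∈ Finset.range n, ∑ j ∈ Finset.Ico (i + 1) n, ∑ k ∈ Finset.Ico (j + 1) n, χ i j k := by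
  have L1 : ∑ k ∈ Finset.range n, ∑ i ∈ Finset.Ico 0 k, ∑ j ∈ Finset.Ico (i + 1) k, χ i j k
      = ∑ k ∈ Finset.range n, ∑ i ∈ Finset.range n, ∑ j ∈ Finset.range n,
          if (0 ≤ i ∧ i < k) ∧ (i + 1 ≤ j ∧ j < k) then χ i j k else 0 := by
    apply Finset.sum_congr rfl
    intro k hk
    have hkn : k ≤ n := le_of_lt (Finset.mem_range.mp hk)
    rw [show (∑ i ∈ Finset.Ico 0 k, ∑ j ∈ Finset.Ico (i + 1) k, χ i j k)
        = ∑ i ∈ Finset.Ico 0 k, ∑ j ∈ Finset.range n, (if i + 1 ≤ j ∧ j < k then χ i j k else 0)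
      from Finset.sum_congr rfl (fun i _ => sum_Ico_guard _ _ _ _ hkn)]
    rw [sum_Ico_guard _ 0 k n hkn]
    apply Finset.sum_congr rfl
    intro i _
    rw [ite_sum]
    apply Finset.sum_congr rfl
    intro j _
    rw [← ite_and]
  have R1 : ∑ i ∈ Finset.range n, ∑ j ∈ Finset.Ico (i + 1) n, ∑ k ∈ Finset.Ico (j + 1) n, χ i j k
      = ∑ i ∈ Finset.range n, ∑ j ∈ Finset.range n, ∑ k ∈ Finset.range n,
          if (i + 1 ≤ j ∧ j < n) ∧ (j + 1 ≤ k ∧ k < n) then χ i j k else 0 := by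
    apply Finset.sum_congr rfl
    intro i _
    rw [show (∑ j ∈ Finset.Ico (i + 1) n, ∑ k ∈ Finset.Ico (j + 1) n, χ i j k)
        = ∑ j ∈ Finset.Ico (i + 1) n, ∑ k ∈ Finset.range n, (if j + 1 ≤ k ∧ k < n then χ i j k else 0)
      from Finset.sum_congr rfl (fun j _ => sum_Ico_guard _ _ _ _ le_rfl)]
    rw [sum_Ico_guard _ (i + 1) n n le_rfl]
    apply Finset.sum_congr rfl
    intro j _
    rw [ite_sum]
    apply Finset.sum_congr rfl
    intro k _
    rw [← ite_and]
  rw [L1, R1, Finset.sum_comm]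
  apply Finset.sum_congr rfl
  intro i _
  rw [Finset.sum_comm]
  apply Finset.sum_congr rfl
  intro j hj
  apply Finset.sum_congr rfl
  intro k hk
  have hjn := Finset.mem_range.mp hj
  have hkn := Finset.mem_range.mp hk
  exact if_congr (by omega) rfl rfl

-- A's per-k count, with the degenerate bound k - 1 + 1 rewritten to k
theorem pcA_shift (s : List Int) (target : Int) (k : Nat) :
    pcA s target (s.getD k 0) 0 (k - 1)
    = ∑ i ∈ Finset.Ico 0 k, ∑ j ∈ Finset.Ico (i + 1) k,
        (if s.getD i 0 + s.getD j 0 + s.getD k 0 < target then (1 : Int) else 0) := by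
  cases k with
  | zero =>
    unfold pcA
    rw [Finset.Ico_self, Finset.sum_empty]
    apply Finset.sum_eq_zero
    intro a ha
    have := Finset.mem_Ico.mp ha
    rw [Finset.Ico_eq_empty (by omega), Finset.sum_empty]
  | succ m =>
    unfold pcA
    simp only [Nat.add_sub_cancel]

theorem cntk_nonneg (s : List Int) (r : Int) (lo hi : Nat) : 0 ≤ cntk s r lo hi :=
  Finset.sum_nonneg (fun k _ => by split_ifs <;> norm_num)

-- once a pair (i, j) contributes nothing, every later pair (i, j') contributes nothing
theorem cntk_zero_mono (s : List Int) (hs : s.Pairwise (· ≤ ·)) (t : Int) (i j j' : Nat)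
    (hjj' : j ≤ j') (hj'n : j' < s.length)
    (h0 : cntk s (t - s.getD i 0 - s.getD j 0) (j + 1) s.length = 0) :
    cntk s (t - s.getD i 0 - s.getD j' 0) (j' + 1) s.length = 0 := by
  have hmono : s.getD j 0 ≤ s.getD j' 0 := sorted_getD_mono s hs hjj' hj'n
  have hterm := (Finset.sum_eq_zero_iff_of_nonneg
    (fun k _ => by split_ifs <;> norm_num)).mp h0
  apply Finset.sum_eq_zero
  intro k hk
  have hk' := Finset.mem_Ico.mp hk
  have h1 := hterm k (Finset.mem_Ico.mpr (by omega))
  have h2 : ¬ (s.getD k 0 < t - s.getD i 0 - s.getD j 0) := by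
    intro h
    rw [if_pos h] at h1
    norm_num at h1
  rw [if_neg (by omega)]

theorem loopB_spec (s : List Int) (target : Int) (hs : s.Pairwise (· ≤ ·)) (i : Nat) :
    ∀ (l : List Nat), (∀ j ∈ l, j < s.length) → l.Pairwise (· ≤ ·) →
      ∀ (total : Int), loopB s target s.length i l total
        = total + (l.map (fun j =>
            cntk s (target - s.getD i 0 - s.getD j 0) (j + 1) s.length)).sum := by
  intro l
  induction l with
  | nil => intro _ _ total; simp [loopB]
  | cons j rest ih =>
    intro hmem hpair total
    have hpair' := List.pairwise_cons.mp hpair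
    have hbs := bsearch_spec s (target - s.getD i 0 - s.getD j 0) hs (j + 1) s.length le_rfl
    have hnn := cntk_nonneg s (target - s.getD i 0 - s.getD j 0) (j + 1) s.length
    simp only [loopB, List.map_cons, List.sum_cons]
    have hcval : ((bsearch s (target - s.getD i 0 - s.getD j 0) (j + 1) s.length - (j + 1) : Nat) : Int)
        = cntk s (target - s.getD i 0 - s.getD j 0) (j + 1) s.length := by omega
    by_cases h0 : (bsearch s (target - s.getD i 0 - s.getD j 0) (j + 1) s.length - (j + 1) : Nat) = 0
    · rw [if_pos h0]
      have hrest : (rest.map (fun j =>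
          cntk s (target - s.getD i 0 - s.getD j 0) (j + 1) s.length)).sum = 0 := by
        apply List.sum_eq_zero
        intro x hx
        obtain ⟨j', hj', rfl⟩ := List.mem_map.mp hx
        exact cntk_zero_mono s hs target i j j' (hpair'.1 j' hj')
          (hmem j' (List.mem_cons_of_mem _ hj')) (by omega)
      rw [hrest]
      omega
    · rw [if_neg h0,
        ih (fun j' hj' => hmem j' (List.mem_cons_of_mem _ hj')) hpair'.2 _]
      omega

-- ===== VERDICT (by name: the statement is the Claim_ definition above) =====
theorem sum_smaller_spec : Claim_equal_sum_smaller := by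
  intro nums target _
  show sum_smaller nums target = sum_smaller_alt nums target
  unfold sum_smaller sum_smaller_alt
  dsimp only
  set s := PySem.List.sorted nums (fun x => x) false with hsdef
  have hs : s.Pairwise (· ≤ ·) := by
    simpa using PySem.List.sorted_pairwise (xs := nums) (key := fun x => x)
  have hA : (List.range s.length).foldl (fun count k => tpA s target (s.getD k 0) 0 (k - 1) count) 0
      = ∑ k ∈ Finset.range s.length, pcA s target (s.getD k 0) 0 (k - 1) := by
    rw [foldl_acc (fun count k => tpA s target (s.getD k 0) 0 (k - 1) count)
        (fun k => pcA s target (s.getD k 0) 0 (k - 1)) (List.range s.length) 0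
        (fun c k hk => tpA_spec s target (s.getD k 0) hs 0 (k - 1) c
          (by have := List.mem_range.mp hk; omega)),
      zero_add, sum_map_range]
  have hB : (List.range s.length).foldl (fun total i =>
        loopB s target s.length i (List.range' (i + 1) (s.length - (i + 1))) total) 0
      = ∑ i ∈ Finset.range s.length, ∑ j ∈ Finset.Ico (i + 1) s.length,
          cntk s (target - s.getD i 0 - s.getD j 0) (j + 1) s.length := by
    rw [foldl_acc _
        (fun i => ∑ j ∈ Finset.Ico (i + 1) s.length,
          cntk s (target - s.getD i 0 - s.getD j 0) (j + 1) s.length) (List.range s.length) 0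
        (fun c i hi => by
          have hiN := List.mem_range.mp hi
          have hpl : (List.range' (i + 1) (s.length - (i + 1))).Pairwise (· ≤ ·) := by
            have h := List.pairwise_lt_range' (s := i + 1) (n := s.length - (i + 1)) (step := 1)
            have h' : (List.range' (i + 1) (s.length - (i + 1))).Pairwise (· < ·) := by
              simpa using h
            exact h'.imp le_of_lt
          beta_reduce
          rw [loopB_spec s target hs i (List.range' (i + 1) (s.length - (i + 1)))
              (fun j hj => by have := List.mem_range'_1.mp hj; omega) hpl c,
            sum_map_range', show i + 1 + (s.length - (i + 1)) = s.length from by omega]),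
      zero_add, sum_map_range]
  rw [hA, hB]
  trans (∑ k ∈ Finset.range s.length, ∑ i ∈ Finset.Ico 0 k, ∑ j ∈ Finset.Ico (i + 1) k,
    (if s.getD i 0 + s.getD j 0 + s.getD k 0 < target then (1 : Int) else 0))
  · exact Finset.sum_congr rfl (fun k _ => pcA_shift s target k)
  rw [fubini]
  apply Finset.sum_congr rfl
  intro i _
  apply Finset.sum_congr rfl
  intro j _
  unfold cntk
  apply Finset.sum_congr rfl
  intro k _
  exact if_congr (by omega) rfl rfl
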